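-- pv_equiv track=rewrite | github.com/RoboMME/robomme_benchmark | scripts/dev/compare_multi_choice_readers.py | _parse_episode_filter
-- ===== SOURCE A (Python) =====
-- from typing import Any, Optional
--
-- def _parse_episode_filter(raw: Optional[str], all_eps: list[int]) -> list[int]:
--     if not raw:
--         return all_eps
--
--     selected: set[int] = set()
--     for token in [x.strip() for x in raw.split(",") if x.strip()]:
--         if "-" in token:
--             lo_s, hi_s = token.split("-", 1)
--             lo = int(lo_s)
--             hi = int(hi_s)
--             if lo > hi:
--                 lo, hi = hi, lo
--             selected.update(range(lo, hi + 1))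
--         else:
--             selected.add(int(token))
--
--     return [ep for ep in all_eps if ep in selected]
-- ===== SOURCE B (Python) =====
-- from typing import Any, Optional
--
-- def _parse_episode_filter(raw: Optional[str], all_eps: list[int]) -> list[int]:
--     if not raw:
--         return all_eps
--
--     tokens = raw.split(",")
--
--     def covers(ep: int, toks: list[int]) -> bool:
--         # recursive scan: no intermediate set or interval list is ever built
--         if not toks:
--             return False
--         t = toks[0].strip()
--         if not t:
--             return covers(ep, toks[1:])
--         if "-" in t:
--             lo_s, hi_s = t.split("-", 1)
--             lo = int(lo_s)
--             hi = int(hi_s)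
--             if lo <= ep <= hi or hi <= ep <= lo:
--                 return True
--         elif int(t) == ep:
--             return True
--         return covers(ep, toks[1:])
--
--     return [ep for ep in all_eps if covers(ep, tokens)]
-- ===== Notes on version B (the rewrite author's own statement) =====
-- stated objective: alternative
-- what changed: B builds no set and no materialized range at all: for each episode it recursively scans the raw comma tokens, parsing each token on the fly and testing interval containment (symmetric, so no lo/hi swap), where A expands every range into a membership set once and filters by set lookup.
import Mathlib
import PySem

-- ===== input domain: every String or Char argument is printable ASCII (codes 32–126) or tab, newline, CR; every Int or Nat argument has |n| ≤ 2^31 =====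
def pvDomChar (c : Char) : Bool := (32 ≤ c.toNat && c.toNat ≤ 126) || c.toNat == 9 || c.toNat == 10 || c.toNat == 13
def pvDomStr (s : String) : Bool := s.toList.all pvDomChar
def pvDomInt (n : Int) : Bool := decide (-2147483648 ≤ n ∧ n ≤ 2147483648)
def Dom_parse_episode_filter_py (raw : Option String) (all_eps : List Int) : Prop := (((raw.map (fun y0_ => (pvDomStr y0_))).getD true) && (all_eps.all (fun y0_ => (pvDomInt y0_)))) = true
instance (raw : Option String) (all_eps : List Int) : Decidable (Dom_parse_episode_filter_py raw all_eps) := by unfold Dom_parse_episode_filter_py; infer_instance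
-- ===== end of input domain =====

-- B builds no set and no materialized range: it filters each episode by a recursive scan of
-- the raw comma tokens, parsing on the fly with a symmetric containment test (objective:
-- alternative algorithm; equal return value).

-- ===== PORT A =====
-- one loop iteration of A: grow the 'selected' set
def pvStepA (sel : PySem.Set Int) (token : String) : PySem.Set Int :=
  if PySem.Str.isIn "-" token then
    let parts := (PySem.Str.splitMax? token "-" 1).getD []
    let lo := (PySem.Int.ofStr? (parts.getD 0 "")).getD 0   -- .getD 0: ValueError, excluded by Pre_
    let hi := (PySem.Int.ofStr? (parts.getD 1 "")).getD 0
    let lohi := if lo > hi then (hi, lo) else (lo, hi)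
    PySem.Set.update sel (PySem.List.pyRange lohi.1 (lohi.2 + 1) 1)
  else
    PySem.Set.add sel ((PySem.Int.ofStr? token).getD 0)

-- A's token list '[x.strip() for x in raw.split(",") if x.strip()]'
def pvTokens (s : String) : List String :=
  (((PySem.Str.split? s ",").getD []).map PySem.Str.strip).filter (fun x => x ≠ "")

def parse_episode_filter_py (raw : Option String) (all_eps : List Int) : List Int :=
  match raw with
  | none => all_eps
  | some s =>
    if s = "" then all_eps           -- 'if not raw'
    else
      let selected := (pvTokens s).foldl pvStepA PySem.Set.empty
      all_eps.filter (fun ep => PySem.Set.contains selected ep)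

-- ===== PORT B =====
-- B's recursive helper 'covers': scan the raw tokens, parse on the fly, no structure built
def pvCovers (ep : Int) : List String → Bool
  | [] => false
  | tok :: rest =>
    let t := PySem.Str.strip tok
    if t = "" then pvCovers ep rest
    else if PySem.Str.isIn "-" t then
      let parts := (PySem.Str.splitMax? t "-" 1).getD []
      let lo := (PySem.Int.ofStr? (parts.getD 0 "")).getD 0   -- .getD 0: ValueError, excluded by Pre_
      let hi := (PySem.Int.ofStr? (parts.getD 1 "")).getD 0
      if (lo ≤ ep ∧ ep ≤ hi) ∨ (hi ≤ ep ∧ ep ≤ lo) then true else pvCovers ep rest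
    else if (PySem.Int.ofStr? t).getD 0 = ep then true else pvCovers ep rest

def parse_episode_filter_py_alt (raw : Option String) (all_eps : List Int) : List Int :=
  match raw with
  | none => all_eps
  | some s =>
    if s = "" then all_eps
    else
      let tokens := (PySem.Str.split? s ",").getD []
      all_eps.filter (fun ep => pvCovers ep tokens)

-- ===== PRECONDITION & SPEC =====
-- a token on which Python's int() calls all succeed (otherwise A raises ValueError)
def pvTokOk (token : String) : Bool :=
  if PySem.Str.isIn "-" token then
    let parts := (PySem.Str.splitMax? token "-" 1).getD []
    (PySem.Int.ofStr? (parts.getD 0 "")).isSome && (PySem.Int.ofStr? (parts.getD 1 "")).isSome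
  else
    (PySem.Int.ofStr? token).isSome

-- Pre_ excludes exactly the inputs on which A raises ValueError (a token whose int() fails)
def Pre_parse_episode_filter_py (raw : Option String) (all_eps : List Int) : Prop :=
  match raw with
  | none => True
  | some s => (pvTokens s).all pvTokOk = true

instance (raw : Option String) (all_eps : List Int) : Decidable (Pre_parse_episode_filter_py raw all_eps) := by
  unfold Pre_parse_episode_filter_py; cases raw <;> infer_instance

def pvWitness_parse_episode_filter_py : Option String × List Int :=
  (some "1, 4-6, 9--2", [0, 1, 2, 5, 6, 9, 10])

def Spec_parse_episode_filter_py (raw : Option String) (all_eps : List Int) (out : List Int) : Prop := out = parse_episode_filter_py_alt raw all_eps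
instance (raw : Option String) (all_eps : List Int) (out : List Int) : Decidable (Spec_parse_episode_filter_py raw all_eps out) := by unfold Spec_parse_episode_filter_py; infer_instance

-- ===== CLAIM (what is proved, stated in full; the proofs are below) =====
def Claim_equal_parse_episode_filter_py : Prop := ∀ (raw : Option String) (all_eps : List Int), Dom_parse_episode_filter_py raw all_eps → Pre_parse_episode_filter_py raw all_eps → Spec_parse_episode_filter_py raw all_eps (parse_episode_filter_py raw all_eps)

-- ===== LEMMAS AND PROOFS =====

-- proof-only abstraction: 'this (already-stripped, nonempty) token selects ep'
def pvHit (t : String) (ep : Int) : Bool :=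
  if PySem.Str.isIn "-" t then
    let parts := (PySem.Str.splitMax? t "-" 1).getD []
    let lo := (PySem.Int.ofStr? (parts.getD 0 "")).getD 0
    let hi := (PySem.Int.ofStr? (parts.getD 1 "")).getD 0
    decide ((lo ≤ ep ∧ ep ≤ hi) ∨ (hi ≤ ep ∧ ep ≤ lo))
  else (PySem.Int.ofStr? t).getD 0 == ep

-- membership in A's step set = membership so far, or the token hits ep
theorem pv_mem_stepA (sel : PySem.Set Int) (t : String) (ep : Int) :
    (ep ∈ pvStepA sel t) ↔ (ep ∈ sel ∨ pvHit t ep = true) := by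
  by_cases h : PySem.Str.isIn "-" t
  · simp only [pvStepA, pvHit, h, if_true]
    split_ifs with hgt <;>
      rw [PySem.Set.mem_update] <;>
      simp only [PySem.List.mem_pyRange_one, decide_eq_true_eq] <;>
      constructor <;> rintro (h1 | h1) <;> first | (left; exact h1) | (right; omega)
  · simp only [pvStepA, pvHit, h, Bool.false_eq_true, if_false, beq_iff_eq]
    rw [PySem.Set.mem_add]
    constructor <;> rintro (h1 | h1) <;> first | (left; exact h1) | (right; omega)

-- fold invariant over A's token list
theorem pv_mem_fold (ts : List String) (sel : PySem.Set Int) (ep : Int) :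
    (ep ∈ ts.foldl pvStepA sel) ↔ (ep ∈ sel ∨ ∃ t ∈ ts, pvHit t ep = true) := by
  induction ts generalizing sel with
  | nil => simp
  | cons t ts ih =>
    simp only [List.foldl_cons, ih, pv_mem_stepA, List.mem_cons]
    constructor
    · rintro ((h | h) | ⟨u, hu, h⟩)
      · exact Or.inl h
      · exact Or.inr ⟨t, Or.inl rfl, h⟩
      · exact Or.inr ⟨u, Or.inr hu, h⟩
    · rintro (h | ⟨u, (rfl | hu), h⟩)
      · exact Or.inl (Or.inl h)
      · exact Or.inl (Or.inr h)
      · exact Or.inr ⟨u, hu, h⟩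

-- one nonempty token of B = pvHit or the rest
theorem pv_covers_cons (tok : String) (ts : List String) (ep : Int)
    (hempty : PySem.Str.strip tok ≠ "") :
    pvCovers ep (tok :: ts) = (pvHit (PySem.Str.strip tok) ep || pvCovers ep ts) := by
  simp only [pvCovers, hempty, if_false, pvHit]
  by_cases hdash : PySem.Str.isIn "-" (PySem.Str.strip tok)
  · simp only [hdash, if_true]
    split_ifs with hc <;> simp only [List.getD_eq_getElem?_getD] at hc <;> simp [hc]
  · simp only [hdash, Bool.false_eq_true, if_false]
    split_ifs with hc <;> simp [beq_iff_eq, hc]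

-- B's recursive scan = 'some stripped, nonempty token hits ep'
theorem pv_covers_iff (ts : List String) (ep : Int) :
    pvCovers ep ts = true ↔
      ∃ t ∈ (ts.map PySem.Str.strip).filter (fun x => x ≠ ""), pvHit t ep = true := by
  induction ts with
  | nil => simp [pvCovers]
  | cons tok ts ih =>
    by_cases hempty : PySem.Str.strip tok = ""
    · rw [show pvCovers ep (tok :: ts) = pvCovers ep ts from by simp [pvCovers, hempty],
        List.map_cons, List.filter_cons_of_neg (by simp [hempty])]
      exact ih
    · rw [pv_covers_cons tok ts ep hempty, List.map_cons,
        List.filter_cons_of_pos (by simp [hempty]), List.exists_mem_cons_iff]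
      simp [ih]

-- ===== VERDICT (by name: the statement is the Claim_ definition above) =====
theorem parse_episode_filter_py_spec : Claim_equal_parse_episode_filter_py := by
  intro raw all_eps _ _
  unfold Spec_parse_episode_filter_py parse_episode_filter_py parse_episode_filter_py_alt
  cases raw with
  | none => rfl
  | some s =>
    by_cases hs : s = ""
    · simp [hs]
    · simp only [hs, if_false]
      apply List.filter_congr
      intro ep _
      rw [Bool.eq_iff_iff, PySem.Set.contains_iff,
        pv_mem_fold (pvTokens s) PySem.Set.empty ep, pv_covers_iff]
      simp [PySem.Set.empty, pvTokens]
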